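-- pv_equiv track=rewrite | github.com/yuanyao366/douma_algo_training_camp | src/com/douma/written_test/meituan/_20210404/_2_Hate_Number.py | getFactorStr
-- ===== SOURCE A (Python) =====
-- def getFactorStr(num):
--     res, i = "", 1
--     while i * i <= num:
--         if num % i == 0:
--             res += str(i)
--         i += 1
--     # 注意，此时 i * i > num，所以要 i --
--     i -= 1
--     # 第二趟反向遍历，对 i 的初始值，还需要根据是否 i * i == num 做判断，避免重复
--     if i * i == num:
--         i -= 1
--     while i >= 1:
--         if num % i == 0:
--             res += str(num // i)
--         i -= 1
--     return res
-- ===== SOURCE B (Python) =====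
-- def getFactorStr(num):
--     small, large = [], []
--     i = 1
--     while i * i <= num:
--         if num % i == 0:
--             small.append(i)
--             if i * i != num:
--                 large.append(num // i)
--         i += 1
--     return "".join(str(d) for d in small + large[::-1])
-- ===== Notes on version B (the rewrite author's own statement) =====
-- stated objective: simpler
-- what changed: A's two separate sqrt(num) scans (ascending i appending str(i), then descending from the fixed-up square root appending str(num//i)) are replaced by ONE ascending scan while i*i<=num that collects small divisors and their cofactors in two lists, emitted as small ++ reversed(large).
import Mathlib
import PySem

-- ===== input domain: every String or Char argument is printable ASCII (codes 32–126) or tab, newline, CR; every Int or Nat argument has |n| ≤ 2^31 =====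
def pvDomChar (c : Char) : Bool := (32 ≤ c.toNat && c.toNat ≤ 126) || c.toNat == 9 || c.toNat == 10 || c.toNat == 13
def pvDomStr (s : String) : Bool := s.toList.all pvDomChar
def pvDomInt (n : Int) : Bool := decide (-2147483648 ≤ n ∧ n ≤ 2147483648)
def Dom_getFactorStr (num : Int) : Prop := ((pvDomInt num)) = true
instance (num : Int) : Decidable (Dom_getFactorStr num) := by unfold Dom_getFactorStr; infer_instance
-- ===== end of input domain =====

-- B replaces A's two separate √n scans (forward then backward with an off-by-one fixup)
-- by ONE √n scan collecting the small and large divisors in two lists, joined at the end (objective: simpler).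

-- ===== PORT A =====
-- first while loop: ascending i while i*i <= num, appending str(i) for divisors; returns (res, exit i).
-- The Nat fuel only makes the recursion structural; with the fuel the ports pass it is never exhausted.
def pvLoopA1 (num : Int) : Nat → Int → String → String × Int
  | 0, i, res => (res, i)
  | fuel + 1, i, res =>
    if i * i ≤ num then
      pvLoopA1 num fuel (i + 1) (if PySem.Int.mod num i == 0 then res ++ PySem.Int.toStr i else res)
    else
      (res, i)

-- second while loop: descending i while i >= 1, appending str(num // i) for divisors
def pvLoopA2 (num : Int) : Nat → Int → String → String
  | 0, _, res => res
  | fuel + 1, i, res =>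
    if 1 ≤ i then
      pvLoopA2 num fuel (i - 1)
        (if PySem.Int.mod num i == 0 then res ++ PySem.Int.toStr (PySem.Int.floordiv num i) else res)
    else
      res

def getFactorStr (num : Int) : String :=
  let p := pvLoopA1 num (num + 1).toNat 1 ""
  let i := p.2 - 1
  let i := if i * i == num then i - 1 else i
  pvLoopA2 num (num + 1).toNat i p.1

-- ===== PORT B =====
-- single while loop: ascending i while i*i <= num, collecting small divisors and (unless i*i == num)
-- the cofactors (same structural-fuel guard)
def pvLoopB (num : Int) : Nat → Int → List Int → List Int → List Int × List Int
  | 0, _, small, large => (small, large)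
  | fuel + 1, i, small, large =>
    if i * i ≤ num then
      if PySem.Int.mod num i == 0 then
        pvLoopB num fuel (i + 1) (small ++ [i])
          (if i * i == num then large else large ++ [PySem.Int.floordiv num i])
      else
        pvLoopB num fuel (i + 1) small large
    else
      (small, large)

def getFactorStr_alt (num : Int) : String :=
  let p := pvLoopB num (num + 1).toNat 1 [] []
  PySem.Str.join "" ((p.1 ++ p.2.reverse).map PySem.Int.toStr)

-- ===== PRECONDITION & SPEC =====
def Spec_getFactorStr (num : Int) (out : String) : Prop := out = getFactorStr_alt num
instance (num : Int) (out : String) : Decidable (Spec_getFactorStr num out) := by unfold Spec_getFactorStr; infer_instance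

-- ===== CLAIM (what is proved, stated in full; the proofs are below) =====
def Claim_equal_getFactorStr : Prop := ∀ (num : Int), Dom_getFactorStr num → Spec_getFactorStr num (getFactorStr num)

-- ===== LEMMAS AND PROOFS =====

-- the integer square root of num, as an Int
def pvK (num : Int) : Int := (Nat.sqrt num.toNat : Int)

lemma pvK_nonneg (num : Int) : 0 ≤ pvK num := by simp [pvK]

lemma pvK_sq_le (num : Int) (h : 0 ≤ num) : pvK num * pvK num ≤ num := by
  have h2 : ((Nat.sqrt num.toNat : Int)) ^ 2 ≤ ((num.toNat : Int)) := by
    exact_mod_cast Nat.sqrt_le' num.toNat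
  have h3 : ((num.toNat : Int)) = num := Int.toNat_of_nonneg h
  unfold pvK
  nlinarith

lemma pvK_lt_succ_sq (num : Int) : num < (pvK num + 1) * (pvK num + 1) := by
  have h : ((num.toNat : Int)) < ((Nat.sqrt num.toNat : Int) + 1) ^ 2 := by
    exact_mod_cast Nat.lt_succ_sqrt' num.toNat
  have h3 : num ≤ ((num.toNat : Int)) := Int.self_le_toNat num
  unfold pvK
  nlinarith

lemma pvK_one_le (num : Int) (h : 1 ≤ num) : 1 ≤ pvK num := by
  have h2 : 0 < Nat.sqrt num.toNat := Nat.sqrt_pos.mpr (by omega)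
  unfold pvK; omega

-- ascending list [i, i+1, ..., pvK num]
def pvAsc (num i : Int) : List Int := (List.range (pvK num + 1 - i).toNat).map (fun t : Nat => i + (t : Int))

-- descending list [i, i-1, ..., 1]
def pvDesc (i : Int) : List Int := (List.range i.toNat).map (fun t : Nat => i - (t : Int))

def pvDiv (num j : Int) : Bool := PySem.Int.mod num j == 0

lemma pvAsc_cons (num i : Int) (h : i ≤ pvK num) : pvAsc num i = i :: pvAsc num (i + 1) := by
  unfold pvAsc
  have h1 : (pvK num + 1 - i).toNat = (pvK num + 1 - (i + 1)).toNat + 1 := by omega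
  rw [h1, List.range_succ_eq_map]
  simp only [List.map_cons, List.map_map, Nat.cast_zero, add_zero]
  refine congrArg₂ List.cons rfl ?_
  apply List.map_congr_left
  intro t _
  simp only [Function.comp_apply]
  push_cast
  ring

lemma pvAsc_nil (num i : Int) (h : pvK num < i) : pvAsc num i = [] := by
  unfold pvAsc
  have : (pvK num + 1 - i).toNat = 0 := by omega
  simp [this]

lemma pvDesc_cons (i : Int) (h : 1 ≤ i) : pvDesc i = i :: pvDesc (i - 1) := by
  unfold pvDesc
  have h1 : i.toNat = (i - 1).toNat + 1 := by omega
  rw [h1, List.range_succ_eq_map]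
  simp only [List.map_cons, List.map_map, Nat.cast_zero, sub_zero]
  refine congrArg₂ List.cons rfl ?_
  apply List.map_congr_left
  intro t _
  simp only [Function.comp_apply]
  push_cast
  ring

lemma pvDesc_nil (i : Int) (h : i < 1) : pvDesc i = [] := by
  unfold pvDesc
  have : i.toNat = 0 := by omega
  simp [this]

lemma pvMem_desc (i j : Int) (h : j ∈ pvDesc i) : 1 ≤ j ∧ j ≤ i := by
  unfold pvDesc at h
  simp at h
  obtain ⟨t, ht, rfl⟩ := h
  omega

-- intercalating the empty separator is flattening
lemma pvIntercalate_nil (l : List (List Char)) : ([] : List Char).intercalate l = l.flatten := by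
  induction l with
  | nil => rfl
  | cons a t ih =>
    cases t with
    | nil => simp [List.intercalate]
    | cons b u => simp_all [List.intercalate, List.intersperse]

-- join over "" is flatten
lemma pvJoin_eq (l : List String) : PySem.Str.join "" l = String.ofList ((l.map String.toList).flatten) := by
  simp [PySem.Str.join, PySem.Chars.join, pvIntercalate_nil]

lemma pvJoin_append (l1 l2 : List String) :
    PySem.Str.join "" (l1 ++ l2) = PySem.Str.join "" l1 ++ PySem.Str.join "" l2 := by
  simp [pvJoin_eq, String.ofList_append]

lemma pvJoin_cons (s : String) (l : List String) :
    PySem.Str.join "" (s :: l) = s ++ PySem.Str.join "" l := by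
  simp [pvJoin_eq, String.ofList_append]

lemma pvJoin_nil : PySem.Str.join "" ([] : List String) = "" := by decide

-- exhausted-guard evaluations (the loops stop at once when their while-condition fails, any fuel)
lemma pvLoopA1_stop (num : Int) (fuel : Nat) (i : Int) (res : String) (h : ¬ i * i ≤ num) :
    pvLoopA1 num fuel i res = (res, i) := by
  cases fuel with
  | zero => rfl
  | succ m => simp [pvLoopA1, h]

lemma pvLoopA2_stop (num : Int) (fuel : Nat) (i : Int) (res : String) (h : ¬ 1 ≤ i) :
    pvLoopA2 num fuel i res = res := by
  cases fuel with
  | zero => rfl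
  | succ m => simp [pvLoopA2, h]

lemma pvLoopB_stop (num : Int) (fuel : Nat) (i : Int) (small large : List Int) (h : ¬ i * i ≤ num) :
    pvLoopB num fuel i small large = (small, large) := by
  cases fuel with
  | zero => rfl
  | succ m => simp [pvLoopB, h]

-- characterisation of A's first loop
lemma pvLoopA1_spec (num : Int) (h0 : 0 ≤ num) :
    ∀ (n : Nat) (fuel : Nat) (i : Int) (res : String), 1 ≤ i → i = pvK num + 1 - (n : Int) → n ≤ fuel →
      pvLoopA1 num fuel i res =
        (res ++ PySem.Str.join "" (((pvAsc num i).filter (pvDiv num)).map PySem.Int.toStr), pvK num + 1) := by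
  intro n
  induction n with
  | zero =>
    intro fuel i res h1 hi _
    have hik : i = pvK num + 1 := by push_cast at hi; omega
    have hguard : ¬ (i * i ≤ num) := by
      rw [hik]; exact not_le.mpr (pvK_lt_succ_sq num)
    rw [pvLoopA1_stop num fuel i res hguard, pvAsc_nil num i (by omega), hik]
    simp [pvJoin_nil]
  | succ n ih =>
    intro fuel i res h1 hi hf
    have hile : i ≤ pvK num := by push_cast at hi; omega
    have hsq : i * i ≤ num := by
      have h2 := pvK_sq_le num h0
      nlinarith
    obtain ⟨m, rfl⟩ : ∃ m, fuel = m + 1 := ⟨fuel - 1, by omega⟩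
    rw [pvLoopA1, if_pos hsq]
    rw [ih m (i + 1) _ (by omega) (by push_cast at hi ⊢; omega) (by omega)]
    rw [pvAsc_cons num i hile]
    cases hdiv : pvDiv num i with
    | true =>
      have hd : (PySem.Int.mod num i == 0) = true := hdiv
      simp [hd, hdiv, pvJoin_cons, String.append_assoc]
    | false =>
      have hd : (PySem.Int.mod num i == 0) = false := hdiv
      simp [hd, hdiv]

-- characterisation of A's second loop
lemma pvLoopA2_spec (num : Int) :
    ∀ (n : Nat) (fuel : Nat) (i : Int) (res : String), i.toNat = n → n ≤ fuel →
      pvLoopA2 num fuel i res =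
        res ++ PySem.Str.join ""
          (((pvDesc i).filter (pvDiv num)).map (fun j => PySem.Int.toStr (PySem.Int.floordiv num j))) := by
  intro n
  induction n with
  | zero =>
    intro fuel i res hi _
    rw [pvLoopA2_stop num fuel i res (by omega), pvDesc_nil i (by omega)]
    simp [pvJoin_nil]
  | succ n ih =>
    intro fuel i res hi hf
    have h1 : 1 ≤ i := by omega
    obtain ⟨m, rfl⟩ : ∃ m, fuel = m + 1 := ⟨fuel - 1, by omega⟩
    rw [pvLoopA2, if_pos h1]
    rw [ih m (i - 1) _ (by omega) (by omega)]
    rw [pvDesc_cons i h1]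
    cases hdiv : pvDiv num i with
    | true =>
      have hd : (PySem.Int.mod num i == 0) = true := hdiv
      simp [hd, hdiv, pvJoin_cons, String.append_assoc]
    | false =>
      have hd : (PySem.Int.mod num i == 0) = false := hdiv
      simp [hd, hdiv]

-- characterisation of B's loop
lemma pvLoopB_spec (num : Int) (h0 : 0 ≤ num) :
    ∀ (n : Nat) (fuel : Nat) (i : Int) (small large : List Int), 1 ≤ i → i = pvK num + 1 - (n : Int) → n ≤ fuel →
      pvLoopB num fuel i small large =
        (small ++ (pvAsc num i).filter (pvDiv num),
         large ++ ((pvAsc num i).filter (fun j => pvDiv num j && !(j * j == num))).map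
           (fun j => PySem.Int.floordiv num j)) := by
  intro n
  induction n with
  | zero =>
    intro fuel i small large h1 hi _
    have hik : i = pvK num + 1 := by push_cast at hi; omega
    have hguard : ¬ (i * i ≤ num) := by
      rw [hik]; exact not_le.mpr (pvK_lt_succ_sq num)
    rw [pvLoopB_stop num fuel i small large hguard, pvAsc_nil num i (by omega)]
    simp
  | succ n ih =>
    intro fuel i small large h1 hi hf
    have hile : i ≤ pvK num := by push_cast at hi; omega
    have hsq : i * i ≤ num := by
      have h2 := pvK_sq_le num h0
      nlinarith
    obtain ⟨m, rfl⟩ : ∃ m, fuel = m + 1 := ⟨fuel - 1, by omega⟩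
    rw [pvLoopB, if_pos hsq]
    rw [pvAsc_cons num i hile]
    cases hdiv : pvDiv num i with
    | true =>
      have hd : (PySem.Int.mod num i == 0) = true := hdiv
      rw [if_pos hd]
      rw [ih m (i + 1) _ _ (by omega) (by push_cast at hi ⊢; omega) (by omega)]
      cases hsqi : (i * i == num : Bool) with
      | true => simp [hdiv, hsqi]
      | false => simp [hdiv, hsqi]
    | false =>
      have hd : ¬ ((PySem.Int.mod num i == 0) = true) := by
        have : pvDiv num i = (PySem.Int.mod num i == 0) := rfl
        simp [← this, hdiv]
      rw [if_neg hd]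
      rw [ih m (i + 1) _ _ (by omega) (by push_cast at hi ⊢; omega) (by omega)]
      simp [hdiv]

-- the integer square root is at most num
lemma pvK_le (num : Int) (h : 0 ≤ num) : pvK num ≤ num := by
  have h1 := pvK_sq_le num h
  have h2 := pvK_nonneg num
  nlinarith

-- reversing [1..m] gives [m..1]
lemma pvRangeRev (m : Nat) :
    ((List.range m).map (fun t : Nat => 1 + (t : Int))).reverse
      = (List.range m).map (fun t : Nat => (m : Int) - (t : Int)) := by
  induction m with
  | zero => simp
  | succ m ih =>
    conv_lhs => rw [List.range_succ]
    conv_rhs => rw [List.range_succ_eq_map]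
    rw [List.map_append, List.reverse_append]
    simp only [List.map_cons, List.map_nil, List.reverse_cons, List.reverse_nil, List.nil_append,
      List.cons_append, ih, List.map_map]
    refine congrArg₂ List.cons (by push_cast; ring) ?_
    apply List.map_congr_left
    intro t _
    simp only [Function.comp_apply]
    push_cast
    ring

lemma pvAsc_one_reverse (num : Int) : (pvAsc num 1).reverse = pvDesc (pvK num) := by
  have hk : 0 ≤ pvK num := pvK_nonneg num
  unfold pvAsc pvDesc
  have e1 : (pvK num + 1 - 1).toNat = (pvK num).toNat := by omega
  rw [e1, pvRangeRev]
  apply List.map_congr_left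
  intro t _
  have : ((pvK num).toNat : Int) = pvK num := by omega
  rw [this]

-- descending divisors down from the adjusted start equal the square-free large divisors, descending
lemma pvFilter_noSq (num k' : Int) (h : ∀ j : Int, 1 ≤ j → j ≤ k' → j * j ≠ num) :
    (pvDesc k').filter (pvDiv num) = (pvDesc k').filter (fun j => pvDiv num j && !(j * j == num)) := by
  apply List.filter_congr
  intro j hj
  have hb := pvMem_desc k' j hj
  have hne : j * j ≠ num := h j hb.1 hb.2
  simp [hne]

-- ===== VERDICT (by name: the statement is the Claim_ definition above) =====
theorem getFactorStr_spec : Claim_equal_getFactorStr := by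
  unfold Claim_equal_getFactorStr
  intro num _
  unfold Spec_getFactorStr
  by_cases hpos : 1 ≤ num
  case neg =>
    have g1 : ¬ ((1 : Int) * 1 ≤ num) := by omega
    have hA1 : pvLoopA1 num (num + 1).toNat 1 "" = ("", 1) := pvLoopA1_stop num _ 1 "" g1
    have hB : pvLoopB num (num + 1).toNat 1 [] [] = ([], []) := pvLoopB_stop num _ 1 [] [] g1
    have hA2 : ∀ j : Int, j ≤ 0 → pvLoopA2 num (num + 1).toNat j "" = "" := by
      intro j hj; exact pvLoopA2_stop num _ j "" (by omega)
    simp only [getFactorStr, getFactorStr_alt, hA1, hB, List.reverse_nil, List.append_nil,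
      List.map_nil, pvJoin_nil]
    split
    · exact hA2 _ (by omega)
    · exact hA2 _ (by omega)
  case pos =>
    have h0 : (0 : Int) ≤ num := by omega
    have hk1 : 1 ≤ pvK num := pvK_one_le num hpos
    have hksq : pvK num * pvK num ≤ num := pvK_sq_le num h0
    have hkle : pvK num ≤ num := pvK_le num h0
    have hA1 := pvLoopA1_spec num h0 (pvK num).toNat (num + 1).toNat 1 "" le_rfl (by omega) (by omega)
    have hB := pvLoopB_spec num h0 (pvK num).toNat (num + 1).toNat 1 ([] : List Int) ([] : List Int)
      le_rfl (by omega) (by omega)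
    simp only [getFactorStr, getFactorStr_alt, hA1, hB, String.empty_append, List.nil_append,
      add_sub_cancel_right]
    rw [List.map_append, pvJoin_append]
    have hrev : (((pvAsc num 1).filter (fun j => pvDiv num j && !(j * j == num))).map
        (fun j => PySem.Int.floordiv num j)).reverse
        = ((pvDesc (pvK num)).filter (fun j => pvDiv num j && !(j * j == num))).map
            (fun j => PySem.Int.floordiv num j) := by
      rw [← List.map_reverse, ← List.filter_reverse, pvAsc_one_reverse num]
    rw [hrev]
    by_cases hsq : pvK num * pvK num = num
    · rw [if_pos (by simp [hsq])]
      rw [pvLoopA2_spec num (pvK num - 1).toNat (num + 1).toNat (pvK num - 1) _ rfl (by omega)]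
      have hlist : (pvDesc (pvK num - 1)).filter (pvDiv num)
          = (pvDesc (pvK num)).filter (fun j => pvDiv num j && !(j * j == num)) := by
        rw [pvDesc_cons (pvK num) hk1]
        rw [List.filter_cons_of_neg (by simp [hsq])]
        exact pvFilter_noSq num (pvK num - 1) (by intro j h1 h2 heq; nlinarith)
      rw [hlist, List.map_map]
      rfl
    · rw [if_neg (by simp [hsq])]
      rw [pvLoopA2_spec num (pvK num).toNat (num + 1).toNat (pvK num) _ rfl (by omega)]
      have hlist : (pvDesc (pvK num)).filter (pvDiv num)
          = (pvDesc (pvK num)).filter (fun j => pvDiv num j && !(j * j == num)) :=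
        pvFilter_noSq num (pvK num) (by intro j h1 h2 heq; exact hsq (by nlinarith))
      rw [hlist, List.map_map]
      rfl
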